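-- pv_equiv track=rewrite | github.com/qibinc/AMiniMiner | extract.py | get_cited_line
-- ===== SOURCE A (Python) =====
-- def lcs(X, Y):
--     # find the length of the strings
--     m = len(X)
--     n = len(Y)
--
--     # declaring the array for storing the dp values
--     L = [[None] * (n + 1) for i in range(m + 1)]
--
--     """Following steps build L[m + 1][n + 1] in bottom up fashion
-- 	Note: L[i][j] contains length of LCS of X[0..i-1]
-- 	and Y[0..j-1]"""
--     for i in range(m + 1):
--         for j in range(n + 1):
--             if i == 0 or j == 0:
--                 L[i][j] = 0
--             elif X[i - 1] == Y[j - 1]: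
--                 L[i][j] = L[i - 1][j - 1] + 1
--             else:
--                 L[i][j] = max(L[i - 1][j], L[i][j - 1])
--
--                 # L[m][n] contains the length of LCS of X[0..n-1] & Y[0..m-1]
--     return L[m][n]
--
-- def get_cited_line(content, title):
--     scores = []
--     for line in content.split("\n"):
--         if "tang" not in line.lower() or "wu" not in line.lower():
--             continue
--         scores.append((lcs(line.lower(), title.lower()), line))
--     if scores == []:
--         return None, None
--     return sorted(scores)[-1]
-- ===== SOURCE B (Python) =====
-- def lcs(X, Y):
--     # demand-driven top-down LCS: explicit DFS stack over (i, j) subproblems with a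
--     # memo dict; on a character match only the diagonal subproblem is explored, so
--     # only the cells the recurrence actually needs are ever computed.
--     memo = {}
--     stack = [(len(X), len(Y), False)]
--     while stack:
--         i, j, ready = stack.pop()
--         if ready:
--             # children are memoized by now: combine
--             if X[i - 1] == Y[j - 1]:
--                 memo[(i, j)] = memo[(i - 1, j - 1)] + 1
--             else:
--                 memo[(i, j)] = max(memo[(i - 1, j)], memo[(i, j - 1)])
--         elif i == 0 or j == 0:
--             memo[(i, j)] = 0
--         elif (i, j) not in memo:
--             stack.append((i, j, True))
--             if X[i - 1] == Y[j - 1]: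
--                 stack.append((i - 1, j - 1, False))
--             else:
--                 stack.append((i - 1, j, False))
--                 stack.append((i, j - 1, False))
--     return memo[(len(X), len(Y))]
--
-- def get_cited_line(content, title):
--     t = title.lower()
--     best = None
--     for line in content.split("\n"):
--         low = line.lower()
--         if "tang" in low and "wu" in low:
--             cand = (lcs(low, t), line)
--             if best is None or cand > best:
--                 best = cand
--     if best is None:
--         return None, None
--     return best
-- ===== Notes on version B (the rewrite author's own statement) =====
-- stated objective: alternative
-- what changed: lcs is computed top-down and demand-driven: an explicit DFS stack over (i,j) subproblems with a memo dict, exploring only the diagonal child on a character match, instead of A's bottom-up fill of the whole (m+1)x(n+1) table; and get_cited_line keeps a one-pass running best (score, line) tuple instead of collecting all scores and sorting.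
import Mathlib
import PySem

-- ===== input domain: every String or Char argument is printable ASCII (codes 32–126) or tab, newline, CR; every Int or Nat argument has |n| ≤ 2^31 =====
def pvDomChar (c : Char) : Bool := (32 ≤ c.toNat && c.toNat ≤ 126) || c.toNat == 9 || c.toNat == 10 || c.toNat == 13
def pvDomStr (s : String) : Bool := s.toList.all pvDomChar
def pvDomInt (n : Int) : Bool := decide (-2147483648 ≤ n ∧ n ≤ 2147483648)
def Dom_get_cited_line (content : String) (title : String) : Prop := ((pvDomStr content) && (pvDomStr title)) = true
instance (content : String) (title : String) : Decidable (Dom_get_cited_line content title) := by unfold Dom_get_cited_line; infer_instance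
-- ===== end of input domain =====

-- B computes each line's LCS length top-down and demand-driven (explicit DFS stack
-- over (i,j) subproblems with a memo dict, only the diagonal child on a character
-- match) instead of A's bottom-up fill of the full (m+1)×(n+1) table, and picks the
-- best line with a one-pass running maximum instead of collect-all-then-sort
-- (objective: alternative algorithm, same worst-case cost).

-- ===== PORT A =====

-- Python `L[i][j]` read (indices are always nonnegative and in range here)
def pvCellA (L : List (List Int)) (i j : Int) : Int :=
  PySem.List.pyGetD (PySem.List.pyGetD L i []) j 0

-- Python `L[i][j] = v` (indices always nonnegative and in range, so .toNat is exact)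
def pvSetCellA (L : List (List Int)) (i j : Int) (v : Int) : List (List Int) :=
  L.set i.toNat ((PySem.List.pyGetD L i []).set j.toNat v)

-- the body of A's inner `for j in range(n + 1)` loop
def pvInnerA (X Y : List Char) (L : List (List Int)) (i j : Int) : List (List Int) :=
  let v : Int :=
    if i = 0 ∨ j = 0 then 0
    else if PySem.List.pyGetD X (i - 1) ' ' = PySem.List.pyGetD Y (j - 1) ' ' then
      pvCellA L (i - 1) (j - 1) + 1
    else
      max (pvCellA L (i - 1) j) (pvCellA L i (j - 1))
  pvSetCellA L i j v

-- A's lcs: build the full table bottom-up, return L[m][n].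
-- Python initialises the cells with None; every cell is written before it is read,
-- so we use 0 as the (unreadable) placeholder.
def pvLcsA (X Y : List Char) : Int :=
  let m : Int := X.length
  let n : Int := Y.length
  let L0 : List (List Int) := List.replicate (X.length + 1) (List.replicate (Y.length + 1) 0)
  let L := (PySem.List.pyRange 0 (m + 1)).foldl
    (fun L i => (PySem.List.pyRange 0 (n + 1)).foldl (fun L j => pvInnerA X Y L i j) L) L0
  pvCellA L m n

def get_cited_line (content : String) (title : String) : Option Int × Option String :=
  -- sep "\n" ≠ "" so split? always returns some
  let lines := (PySem.Str.split? content "\n").getD []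
  let scores : List (Int × String) := lines.foldl (fun scores line =>
    if !(PySem.Str.isIn "tang" (PySem.Str.lower line)) || !(PySem.Str.isIn "wu" (PySem.Str.lower line)) then
      scores
    else
      scores ++ [(pvLcsA (PySem.Str.lower line).toList (PySem.Str.lower title).toList, line)]) []
  if scores = [] then (none, none)
  else
    -- Python sorted(scores) on 2-tuples = sorted with the lexicographic tuple key; [-1] = last
    match (PySem.List.sorted2 scores Prod.fst Prod.snd).getLast? with
    | some p => (some p.1, some p.2)
    | none => (none, none)   -- unreachable: scores ≠ []

-- ===== PORT B =====

-- weight of a stack entry / stack, the termination measure of B's while loop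
def pvEntryW (e : Nat × Nat × Bool) : Nat := (if e.2.2 then 1 else 2) * 5 ^ (e.1 + e.2.1)
def pvStackW (s : List (Nat × Nat × Bool)) : Nat := (s.map pvEntryW).sum

lemma pvPow5_pos (s : Nat) : 0 < 5 ^ s := Nat.pow_pos (by omega)

lemma pvW_match (i j : Nat) (hi : i ≠ 0) (hj : j ≠ 0) :
    2 * 5 ^ ((i - 1) + (j - 1)) + (1 * 5 ^ (i + j)) < 2 * 5 ^ (i + j) := by
  have h : (i - 1) + (j - 1) + 2 = i + j := by omega
  have h2 : 5 ^ (i + j) = 25 * 5 ^ ((i - 1) + (j - 1)) := by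
    rw [← h, pow_add]; ring
  rw [h2]; have := pvPow5_pos ((i - 1) + (j - 1)); omega

lemma pvW_split (i j : Nat) (hi : i ≠ 0) (hj : j ≠ 0) :
    2 * 5 ^ (i + (j - 1)) + (2 * 5 ^ ((i - 1) + j) + (1 * 5 ^ (i + j))) < 2 * 5 ^ (i + j) := by
  have h1 : i + (j - 1) + 1 = i + j := by omega
  have h2 : (i - 1) + j + 1 = i + j := by omega
  have e1 : 5 ^ (i + j) = 5 * 5 ^ (i + (j - 1)) := by rw [← h1, pow_succ]; ring
  have e2 : 5 ^ (i + (j - 1)) = 5 ^ ((i - 1) + j) := by congr 1; omega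
  rw [e1, e2]; have := pvPow5_pos ((i - 1) + j); omega

-- B's while loop: pop (i, j, ready) from the stack top (head), update memo / push
-- subproblems, until the stack is empty; returns the memo.
def pvRunB (X Y : List Char) (stack : List (Nat × Nat × Bool))
    (memo : PySem.Dict (Nat × Nat) Int) : PySem.Dict (Nat × Nat) Int :=
  match stack with
  | [] => memo
  | (i, j, true) :: rest =>
    if X.getD (i - 1) ' ' = Y.getD (j - 1) ' ' then
      pvRunB X Y rest (memo.insert (i, j) (memo.getD (i - 1, j - 1) 0 + 1))
    else
      pvRunB X Y rest (memo.insert (i, j) (max (memo.getD (i - 1, j) 0) (memo.getD (i, j - 1) 0)))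
  | (i, j, false) :: rest =>
    if h0 : i = 0 ∨ j = 0 then
      pvRunB X Y rest (memo.insert (i, j) 0)
    else if memo.contains (i, j) then
      pvRunB X Y rest memo
    else if X.getD (i - 1) ' ' = Y.getD (j - 1) ' ' then
      pvRunB X Y ((i - 1, j - 1, false) :: (i, j, true) :: rest) memo
    else
      pvRunB X Y ((i, j - 1, false) :: (i - 1, j, false) :: (i, j, true) :: rest) memo
termination_by pvStackW stack
decreasing_by
  · simp [pvStackW, pvEntryW]
  · simp [pvStackW, pvEntryW]
  · simp [pvStackW, pvEntryW]
  · simp [pvStackW, pvEntryW]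
  · push_neg at h0
    simp [pvStackW, pvEntryW]
    have := pvW_match i j h0.1 h0.2; omega
  · push_neg at h0
    simp [pvStackW, pvEntryW]
    have := pvW_split i j h0.1 h0.2; omega

-- B's lcs: run the machine from the single root subproblem, read memo[(m, n)]
-- (always present, so the default is never used)
def pvLcsB (X Y : List Char) : Int :=
  (pvRunB X Y [(X.length, Y.length, false)] PySem.Dict.empty).getD (X.length, Y.length) 0

-- Python `cand > best` on (int, str) 2-tuples, i.e. `best < cand` lexicographically
def pvTupLt (a b : Int × String) : Bool :=
  decide (a.1 < b.1) || (!decide (b.1 < a.1) && decide (a.2 < b.2))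

def get_cited_line_alt (content : String) (title : String) : Option Int × Option String :=
  let t := PySem.Str.lower title
  let lines := (PySem.Str.split? content "\n").getD []
  let best : Option (Int × String) := lines.foldl (fun best line =>
    let low := PySem.Str.lower line
    if PySem.Str.isIn "tang" low && PySem.Str.isIn "wu" low then
      let cand := (pvLcsB low.toList t.toList, line)
      match best with
      | none => some cand
      | some b => if pvTupLt b cand then some cand else some b
    else best) none
  match best with
  | none => (none, none)
  | some p => (some p.1, some p.2)

-- ===== PRECONDITION & SPEC =====
def Spec_get_cited_line (content : String) (title : String) (out : Option Int × Option String) : Prop := out = get_cited_line_alt content title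
instance (content : String) (title : String) (out : Option Int × Option String) : Decidable (Spec_get_cited_line content title out) := by unfold Spec_get_cited_line; infer_instance

-- ===== CLAIM (what is proved, stated in full; the proofs are below) =====
def Claim_equal_get_cited_line : Prop := ∀ (content : String) (title : String), Dom_get_cited_line content title → Spec_get_cited_line content title (get_cited_line content title)

-- ===== LEMMAS AND PROOFS =====

-- The common LCS recurrence, as a pure function of the two prefix lengths.
def lcsE (X Y : List Char) : Nat → Nat → Int
  | 0, _ => 0
  | _ + 1, 0 => 0
  | i + 1, j + 1 =>
    if X.getD i ' ' = Y.getD j ' ' then lcsE X Y i j + 1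
    else max (lcsE X Y i (j + 1)) (lcsE X Y (i + 1) j)
termination_by i j => i + j

lemma lcsE_zero_right (X Y : List Char) (i : Nat) : lcsE X Y i 0 = 0 := by
  cases i <;> simp [lcsE]

-- ---- A-side: table invariant ----

-- partially filled row k: first t entries correct, rest still the placeholder
def pvRowP (X Y : List Char) (k t : Nat) : List Int :=
  (List.range t).map (fun j => lcsE X Y k j) ++ List.replicate (Y.length + 1 - t) 0

-- table while row k is being filled up to column t
def pvTabP (X Y : List Char) (k t : Nat) : List (List Int) :=
  (List.range k).map (fun i => pvRowP X Y i (Y.length + 1)) ++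
  [pvRowP X Y k t] ++
  List.replicate (X.length - k) (List.replicate (Y.length + 1) 0)

lemma pvRowP_getD (X Y : List Char) (k t j : Nat) (hj : j < t) (ht : t ≤ Y.length + 1) :
    (pvRowP X Y k t).getD j 0 = lcsE X Y k j := by
  unfold pvRowP
  rw [List.getD_append _ _ _ _ (by simp [hj])]
  simp [List.getD, hj]

lemma pvTabP_getD_lt (X Y : List Char) (k t i : Nat) (hi : i < k) :
    (pvTabP X Y k t).getD i [] = pvRowP X Y i (Y.length + 1) := by
  unfold pvTabP
  rw [List.append_assoc, List.getD_append _ _ _ _ (by simp [hi])]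
  simp [List.getD, hi]

lemma pvTabP_getD_self (X Y : List Char) (k t : Nat) :
    (pvTabP X Y k t).getD k [] = pvRowP X Y k t := by
  unfold pvTabP
  simp [List.getD]

-- the placeholder row k of pvTabP, with cell t overwritten by the correct value
lemma pvRowP_set (X Y : List Char) (k t : Nat) (ht : t ≤ Y.length) :
    (pvRowP X Y k t).set t (lcsE X Y k t) = pvRowP X Y k (t + 1) := by
  unfold pvRowP
  rw [List.set_append_right _ _ (by simp)]
  have h1 : Y.length + 1 - t = (Y.length - t) + 1 := by omega
  have h2 : Y.length + 1 - (t + 1) = Y.length - t := by omega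
  simp [h1, h2, List.range_succ, List.replicate_succ]

lemma pvTabP_set (X Y : List Char) (k t : Nat) (r : List Int) :
    (pvTabP X Y k t).set k r =
      (List.range k).map (fun i => pvRowP X Y i (Y.length + 1)) ++ [r] ++
      List.replicate (X.length - k) (List.replicate (Y.length + 1) 0) := by
  unfold pvTabP
  rw [List.append_assoc, List.set_append_right _ _ (by simp)]
  simp

lemma pvInnerA_step (X Y : List Char) (k t : Nat) (hk : k ≤ X.length) (ht : t ≤ Y.length) :
    pvInnerA X Y (pvTabP X Y k t) (k : Int) (t : Int) = pvTabP X Y k (t + 1) := by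
  unfold pvInnerA pvSetCellA
  have hset : ∀ v : Int, v = lcsE X Y k t →
      (pvTabP X Y k t).set ((k : Int)).toNat
        (((PySem.List.pyGetD (pvTabP X Y k t) (k : Int) []).set ((t : Int)).toNat v)) =
        pvTabP X Y k (t + 1) := by
    intro v hv
    rw [PySem.List.pyGetD_natCast, pvTabP_getD_self, Int.toNat_natCast, Int.toNat_natCast,
        hv, pvRowP_set X Y k t ht]
    exact pvTabP_set X Y k t _
  apply hset
  rcases Nat.eq_zero_or_pos k with hk0 | hk0
  · subst hk0; simp [lcsE]
  rcases Nat.eq_zero_or_pos t with ht0 | ht0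
  · subst ht0; simp [lcsE_zero_right, hk0.ne']
  -- both positive: the recurrence case
  obtain ⟨k', rfl⟩ : ∃ k', k = k' + 1 := ⟨k - 1, by omega⟩
  obtain ⟨t', rfl⟩ : ∃ t', t = t' + 1 := ⟨t - 1, by omega⟩
  have hcast : ∀ a : Nat, ((a + 1 : Nat) : Int) - 1 = ((a : Nat) : Int) := by intro a; push_cast; ring
  have hne : ¬(((k' + 1 : Nat) : Int) = 0 ∨ ((t' + 1 : Nat) : Int) = 0) := by push_cast; omega
  rw [if_neg hne]
  unfold pvCellA
  rw [hcast, hcast]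
  simp only [PySem.List.pyGetD_natCast]
  rw [pvTabP_getD_lt X Y _ _ k' (by omega), pvTabP_getD_self]
  rw [pvRowP_getD X Y k' _ t' (by omega) (by omega),
      pvRowP_getD X Y k' _ (t' + 1) (by omega) (by omega),
      pvRowP_getD X Y (k' + 1) _ t' (by omega) (by omega)]
  rw [show lcsE X Y (k' + 1) (t' + 1) =
        if X.getD k' ' ' = Y.getD t' ' ' then lcsE X Y k' t' + 1
        else max (lcsE X Y k' (t' + 1)) (lcsE X Y (k' + 1) t') from by rw [lcsE]]

lemma pvInner_fold_aux (X Y : List Char) (k : Nat) (hk : k ≤ X.length) (t : Nat)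
    (ht : t ≤ Y.length + 1) :
    List.foldl (fun L (j : Nat) => pvInnerA X Y L (k : Int) (j : Int)) (pvTabP X Y k 0)
      (List.range t) = pvTabP X Y k t := by
  induction t with
  | zero => simp
  | succ t ih =>
    rw [List.range_succ, List.foldl_append, ih (by omega)]
    simpa using pvInnerA_step X Y k t hk (by omega)

lemma pvInner_fold (X Y : List Char) (k : Nat) (hk : k ≤ X.length) :
    (PySem.List.pyRange 0 ((Y.length : Int) + 1)).foldl
      (fun L j => pvInnerA X Y L (k : Int) j) (pvTabP X Y k 0) = pvTabP X Y k (Y.length + 1) := by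
  rw [show ((Y.length : Int) + 1) = ((Y.length + 1 : Nat) : Int) from by push_cast; ring,
      PySem.List.pyRange_zero_natCast, List.foldl_map]
  exact pvInner_fold_aux X Y k hk (Y.length + 1) le_rfl

lemma pvTabP_shift (X Y : List Char) (k : Nat) (hk : k < X.length) :
    pvTabP X Y k (Y.length + 1) = pvTabP X Y (k + 1) 0 := by
  unfold pvTabP
  rw [List.range_succ, show X.length - k = (X.length - (k + 1)) + 1 from by omega]
  simp [pvRowP, List.replicate_succ]

lemma pvOuter_fold (X Y : List Char) (k : Nat) (hk : k ≤ X.length) :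
    List.foldl
      (fun L (i : Nat) => (PySem.List.pyRange 0 ((Y.length : Int) + 1)).foldl
        (fun L j => pvInnerA X Y L (i : Int) j) L)
      (List.replicate (X.length + 1) (List.replicate (Y.length + 1) 0))
      (List.range (k + 1)) = pvTabP X Y k (Y.length + 1) := by
  induction k with
  | zero =>
    have h0 : List.replicate (X.length + 1) (List.replicate (Y.length + 1) (0 : Int)) =
        pvTabP X Y 0 0 := by
      simp [pvTabP, pvRowP, List.replicate_succ]
    rw [show List.range 1 = [0] from rfl]
    simpa [h0] using pvInner_fold X Y 0 (by omega)
  | succ k ih =>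
    rw [List.range_succ, List.foldl_append, ih (by omega)]
    simp only [List.foldl_cons, List.foldl_nil]
    rw [pvTabP_shift X Y k (by omega)]
    exact pvInner_fold X Y (k + 1) hk

lemma pvLcsA_eq (X Y : List Char) : pvLcsA X Y = lcsE X Y X.length Y.length := by
  unfold pvLcsA
  dsimp only
  rw [show ((X.length : Int) + 1) = ((X.length + 1 : Nat) : Int) from by push_cast; ring,
      PySem.List.pyRange_zero_natCast, List.foldl_map]
  rw [pvOuter_fold X Y X.length le_rfl]
  unfold pvCellA
  rw [PySem.List.pyGetD_natCast, PySem.List.pyGetD_natCast, pvTabP_getD_self,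
      pvRowP_getD X Y _ _ _ (by omega) le_rfl]

-- ---- B-side: correctness of the demand-driven stack machine ----

lemma pvPow5_succ2 (a b : Nat) : 5 ^ ((a + 1) + (b + 1)) = 25 * 5 ^ (a + b) := by
  have h : (a + 1) + (b + 1) = (a + b) + 2 := by omega
  rw [h, pow_add]; ring

lemma pvPow5_succ1l (a b : Nat) : 5 ^ ((a + 1) + b) = 5 * 5 ^ (a + b) := by
  have h : (a + 1) + b = (a + b) + 1 := by omega
  rw [h, pow_succ]; ring

lemma pvPow5_succ1r (a b : Nat) : 5 ^ (a + (b + 1)) = 5 * 5 ^ (a + b) := by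
  have h : a + (b + 1) = (a + b) + 1 := by omega
  rw [h, pow_succ]; ring

-- every memoized value is the LCS value of its cell
def pvGood (X Y : List Char) (memo : PySem.Dict (Nat × Nat) Int) : Prop :=
  ∀ i j : Nat, ∀ v : Int, memo.get? (i, j) = some v → v = lcsE X Y i j

-- one phase-1 (ready) step of the machine, in closed form
lemma pvRunB_ready (X Y : List Char) (i j : Nat) (rest : List (Nat × Nat × Bool))
    (memo : PySem.Dict (Nat × Nat) Int) :
    pvRunB X Y ((i, j, true) :: rest) memo =
      pvRunB X Y rest (memo.insert (i, j)
        (if X.getD (i - 1) ' ' = Y.getD (j - 1) ' ' then memo.getD (i - 1, j - 1) 0 + 1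
         else max (memo.getD (i - 1, j) 0) (memo.getD (i, j - 1) 0))) := by
  rw [pvRunB]
  split <;> simp_all

-- processing a phase-0 entry: it gets memoized correctly, the memo only grows
-- (strong induction on the stack weight)
lemma pvRun_ph0 (X Y : List Char) : ∀ (W i j : Nat) (rest : List (Nat × Nat × Bool))
    (memo : PySem.Dict (Nat × Nat) Int),
    pvStackW ((i, j, false) :: rest) ≤ W → pvGood X Y memo →
    ∃ memo', pvRunB X Y ((i, j, false) :: rest) memo = pvRunB X Y rest memo' ∧
      pvGood X Y memo' ∧
      (∀ k v, memo.get? k = some v → memo'.get? k = some v) ∧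
      memo'.get? (i, j) = some (lcsE X Y i j) := by
  intro W
  induction W with
  | zero =>
    intro i j rest memo hW _
    exfalso
    simp [pvStackW, pvEntryW] at hW
  | succ W ih =>
    intro i j rest memo hW hgood
    by_cases h0 : i = 0 ∨ j = 0
    · -- base case: insert 0
      refine ⟨memo.insert (i, j) 0, ?_, ?_, ?_, ?_⟩
      · rw [pvRunB, dif_pos h0]
      · intro a b v hv
        rw [PySem.Dict.get?_insert] at hv
        split at hv
        · rename_i he
          have ha : a = i ∧ b = j := by
            exact ⟨congrArg Prod.fst he, congrArg Prod.snd he⟩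
          obtain ⟨rfl, rfl⟩ := ha
          cases hv
          rcases h0 with rfl | rfl
          · simp [lcsE]
          · simp [lcsE_zero_right]
        · exact hgood a b v hv
      · intro k v hv
        rw [PySem.Dict.get?_insert]
        split
        · rename_i he
          subst he
          have := hgood i j v hv
          subst this
          rcases h0 with rfl | rfl
          · simp [lcsE]
          · simp [lcsE_zero_right]
        · exact hv
      · rw [PySem.Dict.get?_insert, if_pos rfl]
        rcases h0 with rfl | rfl
        · simp [lcsE]
        · simp [lcsE_zero_right]
    · by_cases hc : memo.contains (i, j)
      · -- memo hit: nothing to do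
        have hsome : (memo.get? (i, j)).isSome := by
          rw [← PySem.Dict.contains_eq_isSome_get?]; exact hc
        obtain ⟨v, hv⟩ := Option.isSome_iff_exists.mp hsome
        refine ⟨memo, ?_, hgood, fun _ _ h => h, ?_⟩
        · rw [pvRunB, dif_neg h0, if_pos hc]
        · rw [hv, hgood i j v hv]
      · -- cell really computed: obtain i, j ≥ 1
        push_neg at h0
        obtain ⟨i', rfl⟩ : ∃ i', i = i' + 1 := ⟨i - 1, by omega⟩
        obtain ⟨j', rfl⟩ : ∃ j', j = j' + 1 := ⟨j - 1, by omega⟩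
        have hW' : ∀ s : List (Nat × Nat × Bool), pvStackW s < pvStackW ((i' + 1, j' + 1, false) :: rest) →
            pvStackW s ≤ W := by
          intro s hs; omega
        by_cases hm : X.getD (i' + 1 - 1) ' ' = Y.getD (j' + 1 - 1) ' '
        · -- match: explore only the diagonal child
          have hstep : pvRunB X Y ((i' + 1, j' + 1, false) :: rest) memo =
              pvRunB X Y ((i' + 1 - 1, j' + 1 - 1, false) :: (i' + 1, j' + 1, true) :: rest) memo := by
            rw [pvRunB, dif_neg (by simp), if_neg hc, if_pos hm]
          obtain ⟨m1, he1, hg1, hmono1, hget1⟩ :=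
            ih (i' + 1 - 1) (j' + 1 - 1) ((i' + 1, j' + 1, true) :: rest) memo
              (hW' _ (by
                simp [pvStackW, pvEntryW, Nat.add_sub_cancel]
                have h2 := pvPow5_succ2 i' j'
                have hp := pvPow5_pos (i' + j')
                omega)) hgood
          have hval : (if X.getD (i' + 1 - 1) ' ' = Y.getD (j' + 1 - 1) ' '
                then m1.getD (i' + 1 - 1, j' + 1 - 1) 0 + 1
                else max (m1.getD (i' + 1 - 1, j' + 1) 0) (m1.getD (i' + 1, j' + 1 - 1) 0)) =
              lcsE X Y (i' + 1) (j' + 1) := by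
            rw [if_pos hm, PySem.Dict.getD_of_get?_eq_some _ _ hget1]
            rw [show lcsE X Y (i' + 1) (j' + 1) =
                  if X.getD i' ' ' = Y.getD j' ' ' then lcsE X Y i' j' + 1
                  else max (lcsE X Y i' (j' + 1)) (lcsE X Y (i' + 1) j') from by rw [lcsE]]
            simp only [Nat.add_sub_cancel]
            rw [if_pos (by simpa using hm)]
          refine ⟨m1.insert (i' + 1, j' + 1) (lcsE X Y (i' + 1) (j' + 1)), ?_, ?_, ?_, ?_⟩
          · rw [hstep, he1, pvRunB_ready, hval]
          · intro a b v hv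
            rw [PySem.Dict.get?_insert] at hv
            split at hv
            · rename_i he
              obtain ⟨rfl, rfl⟩ : a = i' + 1 ∧ b = j' + 1 :=
                ⟨congrArg Prod.fst he, congrArg Prod.snd he⟩
              cases hv; rfl
            · exact hg1 a b v hv
          · intro k v hv
            rw [PySem.Dict.get?_insert]
            split
            · rename_i he
              subst he
              have := hgood _ _ v hv
              rw [this]
            · exact hmono1 k v hv
          · rw [PySem.Dict.get?_insert, if_pos rfl]
        · -- mismatch: explore both children
          have hstep : pvRunB X Y ((i' + 1, j' + 1, false) :: rest) memo =
              pvRunB X Y ((i' + 1, j' + 1 - 1, false) :: (i' + 1 - 1, j' + 1, false) ::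
                (i' + 1, j' + 1, true) :: rest) memo := by
            rw [pvRunB, dif_neg (by simp), if_neg hc, if_neg hm]
          have hwlt : pvStackW ((i' + 1, j' + 1 - 1, false) :: (i' + 1 - 1, j' + 1, false) ::
              (i' + 1, j' + 1, true) :: rest) < pvStackW ((i' + 1, j' + 1, false) :: rest) := by
            simp [pvStackW, pvEntryW, Nat.add_sub_cancel]
            have h2 := pvPow5_succ2 i' j'
            have h3 := pvPow5_succ1l i' j'
            have h4 := pvPow5_succ1r i' j'
            have hp := pvPow5_pos (i' + j')
            omega
          obtain ⟨m1, he1, hg1, hmono1, hget1⟩ :=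
            ih (i' + 1) (j' + 1 - 1) ((i' + 1 - 1, j' + 1, false) :: (i' + 1, j' + 1, true) :: rest)
              memo (hW' _ hwlt) hgood
          have hwlt2 : pvStackW ((i' + 1 - 1, j' + 1, false) :: (i' + 1, j' + 1, true) :: rest) <
              pvStackW ((i' + 1, j' + 1, false) :: rest) := by
            simp [pvStackW, pvEntryW, Nat.add_sub_cancel]
            have h2 := pvPow5_succ2 i' j'
            have h4 := pvPow5_succ1r i' j'
            have hp := pvPow5_pos (i' + j')
            omega
          obtain ⟨m2, he2, hg2, hmono2, hget2⟩ :=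
            ih (i' + 1 - 1) (j' + 1) ((i' + 1, j' + 1, true) :: rest) m1 (hW' _ hwlt2) hg1
          have hval : (if X.getD (i' + 1 - 1) ' ' = Y.getD (j' + 1 - 1) ' '
                then m2.getD (i' + 1 - 1, j' + 1 - 1) 0 + 1
                else max (m2.getD (i' + 1 - 1, j' + 1) 0) (m2.getD (i' + 1, j' + 1 - 1) 0)) =
              lcsE X Y (i' + 1) (j' + 1) := by
            rw [if_neg hm, PySem.Dict.getD_of_get?_eq_some _ _ hget2,
                PySem.Dict.getD_of_get?_eq_some _ _ (hmono2 _ _ hget1)]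
            rw [show lcsE X Y (i' + 1) (j' + 1) =
                  if X.getD i' ' ' = Y.getD j' ' ' then lcsE X Y i' j' + 1
                  else max (lcsE X Y i' (j' + 1)) (lcsE X Y (i' + 1) j') from by rw [lcsE]]
            simp only [Nat.add_sub_cancel]
            rw [if_neg (by simpa using hm)]
          refine ⟨m2.insert (i' + 1, j' + 1) (lcsE X Y (i' + 1) (j' + 1)), ?_, ?_, ?_, ?_⟩
          · rw [hstep, he1, he2, pvRunB_ready, hval]
          · intro a b v hv
            rw [PySem.Dict.get?_insert] at hv
            split at hv
            · rename_i he
              obtain ⟨rfl, rfl⟩ : a = i' + 1 ∧ b = j' + 1 :=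
                ⟨congrArg Prod.fst he, congrArg Prod.snd he⟩
              cases hv; rfl
            · exact hg2 a b v hv
          · intro k v hv
            rw [PySem.Dict.get?_insert]
            split
            · rename_i he
              subst he
              have := hgood _ _ v hv
              rw [this]
            · exact hmono2 k v (hmono1 k v hv)
          · rw [PySem.Dict.get?_insert, if_pos rfl]

lemma pvLcsB_eq (X Y : List Char) : pvLcsB X Y = lcsE X Y X.length Y.length := by
  unfold pvLcsB
  have hgood : pvGood X Y PySem.Dict.empty := by
    intro i j v hv
    rw [PySem.Dict.get?_empty] at hv
    cases hv
  obtain ⟨m', he, _, _, hget⟩ :=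
    pvRun_ph0 X Y (pvStackW [(X.length, Y.length, false)]) X.length Y.length []
      PySem.Dict.empty le_rfl hgood
  rw [he, pvRunB, PySem.Dict.getD_of_get?_eq_some _ _ hget]

lemma pvLcs_eq (X Y : List Char) : pvLcsB X Y = pvLcsA X Y := by
  rw [pvLcsA_eq, pvLcsB_eq]

-- ---- the tuple order ----

lemma pvTupLt_iff (a b : Int × String) :
    pvTupLt a b = true ↔ a.1 < b.1 ∨ (a.1 = b.1 ∧ a.2 < b.2) := by
  simp only [pvTupLt, Bool.or_eq_true, Bool.and_eq_true, Bool.not_eq_true',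
    decide_eq_true_eq, decide_eq_false_iff_not, not_lt]
  constructor
  · rintro (h | ⟨h1, h2⟩)
    · exact Or.inl h
    · rcases eq_or_lt_of_le h1 with he | hl
      · exact Or.inr ⟨he, h2⟩
      · exact Or.inl hl
  · rintro (h | ⟨h1, h2⟩)
    · exact Or.inl h
    · exact Or.inr ⟨le_of_eq h1, h2⟩

lemma pvTupLt_trans {a b c : Int × String} (h1 : pvTupLt a b = true) (h2 : pvTupLt b c = true) :
    pvTupLt a c = true := by
  rw [pvTupLt_iff] at h1 h2 ⊢
  rcases h1 with h1 | ⟨h1, h1'⟩ <;> rcases h2 with h2 | ⟨h2, h2'⟩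
  · exact Or.inl (lt_trans h1 h2)
  · exact Or.inl (h2 ▸ h1)
  · exact Or.inl (h1 ▸ h2)
  · exact Or.inr ⟨h1.trans h2, lt_trans h1' h2'⟩

lemma pvTupLt_asymm {a b : Int × String} (h : pvTupLt a b = true) : pvTupLt b a = false := by
  rw [Bool.eq_false_iff]
  intro hba
  rw [pvTupLt_iff] at h hba
  rcases h with h | ⟨h, h'⟩ <;> rcases hba with hb | ⟨hb, hb'⟩
  · exact absurd hb (lt_asymm h)
  · exact absurd h (hb ▸ lt_irrefl _)
  · exact absurd hb (h ▸ lt_irrefl _)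
  · exact absurd hb' (lt_asymm h')

lemma pvTupLt_eq_of_both_false {a b : Int × String} (h1 : pvTupLt a b = false)
    (h2 : pvTupLt b a = false) : a = b := by
  have h1' : ¬(a.1 < b.1 ∨ (a.1 = b.1 ∧ a.2 < b.2)) := fun hp => by
    simp [(pvTupLt_iff a b).2 hp] at h1
  have h2' : ¬(b.1 < a.1 ∨ (b.1 = a.1 ∧ b.2 < a.2)) := fun hp => by
    simp [(pvTupLt_iff b a).2 hp] at h2
  push_neg at h1' h2'
  have e1 : a.1 = b.1 := le_antisymm h2'.1 h1'.1
  have e2 : a.2 = b.2 := le_antisymm (h2'.2 e1.symm) (h1'.2 e1)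
  exact Prod.ext e1 e2

-- ---- sorted()[-1] = running max ----

def pvBestStep (b : Option (Int × String)) (c : Int × String) : Option (Int × String) :=
  match b with
  | none => some c
  | some b => if pvTupLt b c then some c else some b

lemma pvInsert_nil (x : Int × String) : PySem.List.insertBy pvTupLt x [] = [x] := rfl

lemma pvInsert_cons (x y : Int × String) (ys : List (Int × String)) :
    PySem.List.insertBy pvTupLt x (y :: ys) =
      if pvTupLt x y then x :: y :: ys else y :: PySem.List.insertBy pvTupLt x ys := rfl

lemma pvInsert_ne_nil (x : Int × String) (l : List (Int × String)) :
    PySem.List.insertBy pvTupLt x l ≠ [] := by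
  cases l with
  | nil => simp [pvInsert_nil]
  | cons y ys =>
    rw [pvInsert_cons]
    split <;> simp

lemma pvInsert_pairwise (x : Int × String) (l : List (Int × String))
    (h : l.Pairwise (fun a b => pvTupLt b a = false)) :
    (PySem.List.insertBy pvTupLt x l).Pairwise (fun a b => pvTupLt b a = false) := by
  induction l with
  | nil => simp [pvInsert_nil]
  | cons y ys ih =>
    rw [List.pairwise_cons] at h
    obtain ⟨hy, hys⟩ := h
    rw [pvInsert_cons]
    split
    · rename_i hxy
      refine List.Pairwise.cons ?_ (List.Pairwise.cons hy hys)
      intro z hz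
      rcases List.mem_cons.1 hz with rfl | hz
      · exact pvTupLt_asymm hxy
      · rw [Bool.eq_false_iff]
        intro hzx
        have hzy := pvTupLt_trans hzx hxy
        have := hy z hz
        simp [hzy] at this
    · rename_i hxy
      refine List.Pairwise.cons ?_ (ih hys)
      intro w hw
      rcases (PySem.List.mem_insertBy pvTupLt x w ys).1 hw with rfl | hw
      · exact Bool.not_eq_true _ ▸ hxy
      · exact hy w hw

lemma pvInsert_getLast (x : Int × String) (l : List (Int × String))
    (h : l.Pairwise (fun a b => pvTupLt b a = false)) :
    (PySem.List.insertBy pvTupLt x l).getLast? =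
      some (match l.getLast? with
            | none => x
            | some b => if pvTupLt b x then x else b) := by
  induction l with
  | nil => simp [pvInsert_nil]
  | cons y ys ih =>
    rw [List.pairwise_cons] at h
    obtain ⟨hy, hys⟩ := h
    rw [pvInsert_cons]
    split
    · rename_i hxy
      -- x goes to the front; the last element stays the last of y :: ys
      obtain ⟨b, hb⟩ : ∃ b, (y :: ys).getLast? = some b := ⟨_, List.getLast?_cons ..⟩
      have hbmem : b ∈ y :: ys := List.mem_of_getLast? hb
      have hbx : pvTupLt b x = false := by
        rw [Bool.eq_false_iff]
        intro hbx
        have hby : pvTupLt b y = true := pvTupLt_trans hbx hxy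
        rcases List.mem_cons.1 hbmem with rfl | hbmem
        · simp [pvTupLt_asymm hby] at hby
        · have := hy b hbmem
          rw [Bool.eq_false_iff] at this
          exact this hby
      rw [List.getLast?_cons_cons, hb]
      simp [hbx]
    · rename_i hxy
      have hxy' : pvTupLt x y = false := Bool.not_eq_true _ ▸ hxy
      cases ys with
      | nil =>
        rw [pvInsert_nil]
        rw [show ((y :: []).getLast? : Option (Int × String)) = some y from rfl]
        simp only [List.getLast?_cons_cons]
        rw [show (([x] : List (Int × String)).getLast? : Option (Int × String)) = some x from rfl]
        rcases hyx : pvTupLt y x with _ | _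
        · have := pvTupLt_eq_of_both_false hxy' hyx
          simp [hyx, this]
        · simp [hyx]
      | cons z zs =>
        have hne := pvInsert_ne_nil x (z :: zs)
        obtain ⟨w, ws, hw⟩ : ∃ w ws, PySem.List.insertBy pvTupLt x (z :: zs) = w :: ws := by
          cases hiz : PySem.List.insertBy pvTupLt x (z :: zs) with
          | nil => exact absurd hiz hne
          | cons w ws => exact ⟨w, ws, rfl⟩
        rw [hw, List.getLast?_cons_cons, ← hw, ih hys, List.getLast?_cons_cons]

lemma pvSorted2_eq_foldl (P : List (Int × String)) :
    PySem.List.sorted2 P Prod.fst Prod.snd =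
      P.foldl (fun acc x => PySem.List.insertBy pvTupLt x acc) [] := by
  rfl

lemma pvSorted2_pairwise (P : List (Int × String)) :
    (PySem.List.sorted2 P Prod.fst Prod.snd).Pairwise (fun a b => pvTupLt b a = false) := by
  rw [pvSorted2_eq_foldl]
  induction P using List.reverseRecOn with
  | nil => simp
  | append_singleton P c ih =>
    rw [List.foldl_append, List.foldl_cons, List.foldl_nil]
    exact pvInsert_pairwise c _ ih

lemma pvPick_eq (P : List (Int × String)) :
    P.foldl pvBestStep none = (PySem.List.sorted2 P Prod.fst Prod.snd).getLast? := by
  induction P using List.reverseRecOn with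
  | nil => rfl
  | append_singleton P c ih =>
    rw [List.foldl_append, List.foldl_cons, List.foldl_nil, ih,
        pvSorted2_eq_foldl (P ++ [c]), List.foldl_append, List.foldl_cons, List.foldl_nil,
        ← pvSorted2_eq_foldl P, pvInsert_getLast c _ (pvSorted2_pairwise P)]
    cases (PySem.List.sorted2 P Prod.fst Prod.snd).getLast? with
    | none => rfl
    | some b => cases h : pvTupLt b c <;> simp [pvBestStep, h]

-- ---- assembling the two functions ----

def pvCond (line : String) : Bool :=
  PySem.Str.isIn "tang" (PySem.Str.lower line) && PySem.Str.isIn "wu" (PySem.Str.lower line)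

def pvScore (title line : String) : Int × String :=
  (pvLcsA (PySem.Str.lower line).toList (PySem.Str.lower title).toList, line)

lemma pvScores_eq (title : String) (lines : List String) :
    lines.foldl (fun scores line =>
      if !(PySem.Str.isIn "tang" (PySem.Str.lower line)) || !(PySem.Str.isIn "wu" (PySem.Str.lower line)) then
        scores
      else
        scores ++ [(pvLcsA (PySem.Str.lower line).toList (PySem.Str.lower title).toList, line)]) [] =
      (lines.filter pvCond).map (pvScore title) := by
  have hfun : (fun (scores : List (Int × String)) line =>
      if !(PySem.Str.isIn "tang" (PySem.Str.lower line)) || !(PySem.Str.isIn "wu" (PySem.Str.lower line)) then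
        scores
      else
        scores ++ [(pvLcsA (PySem.Str.lower line).toList (PySem.Str.lower title).toList, line)]) =
      fun acc x => if pvCond x then acc ++ [pvScore title x] else acc := by
    funext acc x
    unfold pvCond pvScore
    cases h1 : PySem.Str.isIn "tang" (PySem.Str.lower x) <;>
      cases h2 : PySem.Str.isIn "wu" (PySem.Str.lower x) <;> simp [h1, h2]
  rw [hfun, PySem.List.foldl_append_if pvCond (pvScore title) lines []]
  simp

lemma pvBFold (p : String → Bool) (f : String → Int × String) (lines : List String)
    (b : Option (Int × String)) :
    lines.foldl (fun best line =>
      if p line then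
        match best with
        | none => some (f line)
        | some bb => if pvTupLt bb (f line) then some (f line) else some bb
      else best) b =
      ((lines.filter p).map f).foldl pvBestStep b := by
  induction lines generalizing b with
  | nil => rfl
  | cons l ls ih =>
    cases hp : p l
    · simp only [List.foldl_cons, hp, Bool.false_eq_true, if_false, List.filter_cons, ih]
    · simp only [List.foldl_cons, hp, if_true, List.filter_cons, List.map_cons]
      rw [ih]
      rfl

-- ===== VERDICT (by name: the statement is the Claim_ definition above) =====
theorem get_cited_line_spec : Claim_equal_get_cited_line := by
  intro content title _
  unfold Spec_get_cited_line get_cited_line get_cited_line_alt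
  dsimp only
  rw [pvScores_eq title ((PySem.Str.split? content "\n").getD [])]
  rw [pvBFold (fun line => PySem.Str.isIn "tang" (PySem.Str.lower line) && PySem.Str.isIn "wu" (PySem.Str.lower line))
      (fun line => (pvLcsB (PySem.Str.lower line).toList (PySem.Str.lower title).toList, line))
      ((PySem.Str.split? content "\n").getD []) none]
  have hfil : ∀ ls : List String,
      ls.filter (fun line => PySem.Str.isIn "tang" (PySem.Str.lower line) && PySem.Str.isIn "wu" (PySem.Str.lower line)) =
      ls.filter pvCond := by intro ls; rfl
  rw [hfil]
  have hmap : ∀ ls : List String,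
      ls.map (fun line => (pvLcsB (PySem.Str.lower line).toList (PySem.Str.lower title).toList, line)) =
      ls.map (pvScore title) := by
    intro ls
    apply List.map_congr_left
    intro x _
    simp [pvScore, pvLcs_eq]
  rw [hmap, pvPick_eq]
  set scores := (((PySem.Str.split? content "\n").getD []).filter pvCond).map (pvScore title) with hs
  by_cases hsc : scores = []
  · rw [if_pos hsc, hsc]
    rfl
  · rw [if_neg hsc]
    cases (PySem.List.sorted2 scores Prod.fst Prod.snd).getLast? with
    | none => rfl
    | some p => rfl
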